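-- pv_equiv track=rewrite | github.com/yasserfarouk/scml-agents | scml_agents/scml2024/oneshot/team_193/AandA.py | distribute_goods
-- ===== SOURCE A (Python) =====
-- def distribute_goods(goods, capacities):
--     # Initialize bins with 0 goods
--     bins = [0] * len(capacities)
--
--     # Continue until all goods are distributed
--     while goods > 0:
--         # Track if we successfully distributed at least one good in this iteration
--         distributed = False
--
--         # Attempt to distribute one good to each bin, starting with the bin
--         # with the lowest current value, without exceeding its capacity
--         for i, capacity in sorted(enumerate(capacities), key=lambda x: bins[x[0]]):
--             if bins[i] < capacity:
--                 bins[i] += 1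
--                 goods -= 1
--                 distributed = True
--                 if goods == 0:
--                     break
--
--         # If we couldn't distribute any goods in this iteration, break the loop
--         # to prevent an infinite loop (this means all bins are at capacity)
--         if not distributed:
--             break
--
--     # Return the final distribution of goods across bins
--     return bins
-- ===== SOURCE B (Python) =====
-- def distribute_goods(goods, capacities):
--     # Water-filling closed form: binary-search the uniform fill level, then
--     # hand the remainder to the lowest-index non-full bins.
--     n = len(capacities)
--     if goods <= 0:
--         return [0] * n
--     total = sum(c for c in capacities if c > 0)
--     if goods >= total:
--         return [c if c > 0 else 0 for c in capacities]
--     lo, hi = 0, goods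
--     while lo < hi:
--         mid = (lo + hi + 1) // 2
--         if sum(min(c, mid) for c in capacities if c > 0) <= goods:
--             lo = mid
--         else:
--             hi = mid - 1
--     level = lo
--     rem = goods - sum(min(c, level) for c in capacities if c > 0)
--     out = []
--     for c in capacities:
--         v = min(c, level) if c > 0 else 0
--         if rem > 0 and c > level:
--             v += 1
--             rem -= 1
--         out.append(v)
--     return out
-- ===== Notes on version B (the rewrite author's own statement) =====
-- stated objective: alternative
-- what changed: A simulates the water-filling round by round, re-sorting the bins by current level on every pass until the goods run out; B never simulates rounds: it binary-searches the uniform fill level L on the monotone consumed-goods function sum(min(c, L) for positive c), then builds the whole answer in one left-to-right pass, handing the remainder to the lowest-index non-full bins.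
import Mathlib
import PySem

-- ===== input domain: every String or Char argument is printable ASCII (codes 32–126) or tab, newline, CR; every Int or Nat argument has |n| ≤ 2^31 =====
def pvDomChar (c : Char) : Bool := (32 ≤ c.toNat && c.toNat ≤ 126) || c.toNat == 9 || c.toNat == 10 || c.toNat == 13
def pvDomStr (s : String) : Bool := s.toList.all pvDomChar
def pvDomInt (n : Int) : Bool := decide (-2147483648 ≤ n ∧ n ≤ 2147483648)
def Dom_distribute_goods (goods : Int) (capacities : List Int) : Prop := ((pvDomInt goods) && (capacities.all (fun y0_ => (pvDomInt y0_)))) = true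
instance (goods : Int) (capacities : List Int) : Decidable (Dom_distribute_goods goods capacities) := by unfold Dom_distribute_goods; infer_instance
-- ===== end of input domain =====

-- B replaces A's pass-by-pass simulation (with a re-sort each round) by a binary search
-- for the uniform fill level plus a single output pass (a different algorithm, same result).

-- ===== PORT A =====
-- One `for` pass of A over the sorted (index, capacity) pairs.  `pyGetD bins i 0` and
-- `bins.set i.toNat` are exact here because every index produced by `enumerate` is a
-- valid non-negative index into `bins` (Python never raises in `bins[i]`).
def pvPass (xs : List (Int × Int)) (bins : List Int) (g : Int) (dist : Bool) :
    List Int × Int × Bool :=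
  match xs with
  | [] => (bins, g, dist)
  | (i, c) :: rest =>
    if PySem.List.pyGetD bins i 0 < c then
      let bins' := bins.set i.toNat (PySem.List.pyGetD bins i 0 + 1)
      if g - 1 = 0 then (bins', g - 1, true)          -- `if goods == 0: break`
      else pvPass rest bins' (g - 1) true
    else pvPass rest bins g dist

-- termination facts for the `while` loop (cited by `decreasing_by` below)
theorem pvPass_goods_le (xs : List (Int × Int)) (bins : List Int) (g : Int) (d : Bool) :
    (pvPass xs bins g d).2.1 ≤ g := by
  induction xs generalizing bins g d with
  | nil => simp [pvPass]
  | cons e rest ih =>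
    obtain ⟨i, c⟩ := e
    simp only [pvPass]
    split_ifs with h1 h2
    · simp
    · have := ih (bins.set i.toNat (PySem.List.pyGetD bins i 0 + 1)) (g - 1) true
      simp at this ⊢
      omega
    · exact ih bins g d

theorem pvPass_lt (xs : List (Int × Int)) (bins : List Int) (g : Int)
    (h : (pvPass xs bins g false).2.2 = true) : (pvPass xs bins g false).2.1 < g := by
  induction xs generalizing bins g with
  | nil => simp [pvPass] at h
  | cons e rest ih =>
    obtain ⟨i, c⟩ := e
    simp only [pvPass] at h ⊢
    split_ifs at h ⊢ with h1 h2
    · simp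
    · have := pvPass_goods_le rest (bins.set i.toNat (PySem.List.pyGetD bins i 0 + 1)) (g - 1) true
      omega
    · exact ih bins g h

-- A's `while goods > 0` loop
def pvWhile (capacities : List Int) (bins : List Int) (g : Int) : List Int :=
  if h : 0 < g then
    match hr : pvPass (PySem.List.sorted (PySem.List.enumerate capacities)
        (fun x => PySem.List.pyGetD bins x.1 0)) bins g false with
    | (bins', g', dist) =>
      if hd : dist then pvWhile capacities bins' g' else bins'
  else bins
termination_by g.toNat
decreasing_by
  have hlt : (pvPass (PySem.List.sorted (PySem.List.enumerate capacities)
      (fun x => PySem.List.pyGetD bins x.1 0)) bins g false).2.1 < g :=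
    pvPass_lt _ _ _ (by rw [hr]; exact hd)
  rw [hr] at hlt
  simp at hlt
  omega

def distribute_goods (goods : Int) (capacities : List Int) : List Int :=
  pvWhile capacities (List.replicate capacities.length 0) goods

-- ===== PORT B =====
-- sum(min(c, m) for c in capacities if c > 0)
def pvSumMin (capacities : List Int) (m : Int) : Int :=
  ((capacities.filter (fun c => decide (0 < c))).map (fun c => min c m)).sum

-- the `while lo < hi` binary search
def pvSearch (capacities : List Int) (goods lo hi : Int) : Int :=
  if h : lo < hi then
    let mid := PySem.Int.floordiv (lo + hi + 1) 2
    if pvSumMin capacities mid ≤ goods then pvSearch capacities goods mid hi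
    else pvSearch capacities goods lo (mid - 1)
  else lo
termination_by (hi - lo).toNat
decreasing_by
  · have hb := PySem.Int.floordiv_two_mid_bounds (lo := lo + 1) (hi := hi) (by omega)
    have h1 : lo + 1 + hi = lo + hi + 1 := by ring
    rw [h1] at hb
    omega
  · have hb := PySem.Int.floordiv_two_mid_bounds (lo := lo + 1) (hi := hi) (by omega)
    have h1 : lo + 1 + hi = lo + hi + 1 := by ring
    rw [h1] at hb
    omega

-- the output-building `for` loop (structural recursion over `capacities`)
def pvFill (level : Int) : List Int → Int → List Int
  | [], _ => []
  | c :: rest, rem =>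
    let v := if 0 < c then min c level else 0
    if 0 < rem ∧ level < c then (v + 1) :: pvFill level rest (rem - 1)
    else v :: pvFill level rest rem

def distribute_goods_alt (goods : Int) (capacities : List Int) : List Int :=
  if goods ≤ 0 then List.replicate capacities.length 0
  else if (capacities.filter (fun c => decide (0 < c))).sum ≤ goods then
    capacities.map (fun c => if 0 < c then c else 0)
  else
    let level := pvSearch capacities goods 0 goods
    pvFill level capacities (goods - pvSumMin capacities level)

-- ===== PRECONDITION & SPEC =====
def Spec_distribute_goods (goods : Int) (capacities : List Int) (out : List Int) : Prop := out = distribute_goods_alt goods capacities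
instance (goods : Int) (capacities : List Int) (out : List Int) : Decidable (Spec_distribute_goods goods capacities out) := by unfold Spec_distribute_goods; infer_instance

-- ===== CLAIM (what is proved, stated in full; the proofs are below) =====
def Claim_equal_distribute_goods : Prop := ∀ (goods : Int) (capacities : List Int), Dom_distribute_goods goods capacities → Spec_distribute_goods goods capacities (distribute_goods goods capacities)

-- ===== LEMMAS AND PROOFS =====

-- the bin contents after `k` complete rounds of A: min(c, k) for positive capacities, else 0
def binsL (capacities : List Int) (k : Int) : List Int :=
  capacities.map (fun c => if 0 < c then min c k else 0)

-- number of bins still below capacity at level k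
def mcN (capacities : List Int) (k : Int) : Nat :=
  capacities.countP (fun c => decide (k < c))

-- the saturated answer
def satL (capacities : List Int) : List Int :=
  capacities.map (fun c => if 0 < c then c else 0)

-- reference recursion: what the remaining rounds of A produce from level k with g goods left
def tgt (capacities : List Int) (k g : Int) : List Int :=
  if mcN capacities k = 0 then binsL capacities k
  else if g ≤ (mcN capacities k : Int) then pvFill k capacities g
  else tgt capacities (k + 1) (g - (mcN capacities k : Int))
termination_by g.toNat
decreasing_by
  rename_i h1 h2
  omega


theorem sumMin_cons (c : Int) (rest : List Int) (m : Int) :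
    pvSumMin (c :: rest) m = (if 0 < c then min c m else 0) + pvSumMin rest m := by
  by_cases h : 0 < c <;> simp [pvSumMin, List.filter_cons, h]

theorem total_cons (c : Int) (rest : List Int) :
    ((c :: rest).filter (fun c => decide (0 < c))).sum
      = (if 0 < c then c else 0) + (rest.filter (fun c => decide (0 < c))).sum := by
  by_cases h : 0 < c <;> simp [List.filter_cons, h]

theorem mcN_cons (c : Int) (rest : List Int) (k : Int) :
    mcN (c :: rest) k = mcN rest k + (if k < c then 1 else 0) := by
  by_cases h : k < c <;> simp [mcN, List.countP_cons, h]

theorem binsL_cons (c : Int) (rest : List Int) (k : Int) :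
    binsL (c :: rest) k = (if 0 < c then min c k else 0) :: binsL rest k := by
  simp [binsL]

-- ---------- small facts about pvFill ----------

theorem pvFill_zero (k : Int) : ∀ (caps : List Int), pvFill k caps 0 = binsL caps k := by
  intro caps
  induction caps with
  | nil => simp [pvFill, binsL]
  | cons c rest ih => simp [pvFill, binsL] at ih ⊢; exact ih

theorem pvFill_full (k : Int) (hk : 0 ≤ k) :
    ∀ (caps : List Int) (r : Int), (mcN caps k : Int) ≤ r → pvFill k caps r = binsL caps (k + 1) := by
  intro caps
  induction caps with
  | nil => intro r _; simp [pvFill, binsL]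
  | cons c rest ih =>
    intro r hr
    by_cases hc : k < c
    · have hc0 : 0 < c := by omega
      have h2 : (mcN (c :: rest) k : Int) = (mcN rest k : Int) + 1 := by
        simp [mcN, List.countP_cons, hc]
      have hmc : (mcN rest k : Int) ≤ r - 1 := by omega
      have hrpos : 0 < r := by
        have h3 : (0 : Int) ≤ (mcN rest k : Int) := by positivity
        omega
      simp only [pvFill, binsL, List.map_cons]
      rw [if_pos ⟨hrpos, hc⟩]
      have h1 : (if 0 < c then min c k else 0) + 1 = (if 0 < c then min c (k + 1) else 0) := by
        rw [if_pos hc0, if_pos hc0]; omega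
      rw [h1, ih (r - 1) hmc]
      rfl
    · have hmc : (mcN rest k : Int) ≤ r := by
        simp [mcN, List.countP_cons, hc] at hr ⊢; exact hr
      simp only [pvFill, binsL, List.map_cons]
      rw [if_neg (by tauto)]
      have h1 : (if 0 < c then min c k else 0) = (if 0 < c then min c (k + 1) else 0) := by
        split_ifs with h0
        · omega
        · rfl
      rw [h1, ih r hmc]
      rfl

-- ---------- stability of Python's sort on the maximal key ----------

theorem filter_insertBy_keyEq {α : Type} (key : α → Int) (k : Int) (x : α) :
    ∀ (acc : List α), (∀ y ∈ acc, key y ≤ k) →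
    (PySem.List.insertBy (fun a b => decide (key a < key b)) x acc).filter
        (fun y => decide (key y = k))
      = acc.filter (fun y => decide (key y = k)) ++ (if key x = k then [x] else []) := by
  intro acc
  induction acc with
  | nil =>
    intro _
    by_cases h : key x = k <;> simp [PySem.List.insertBy, List.filter, h]
  | cons y ys ih =>
    intro hacc
    by_cases hlt : key x < key y
    · have hyk : key y ≤ k := hacc y (by simp)
      have hxk : ¬ key x = k := by omega
      simp [PySem.List.insertBy, hlt, List.filter_cons, hxk]
    · have hys : ∀ z ∈ ys, key z ≤ k := fun z hz => hacc z (by simp [hz])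
      simp only [PySem.List.insertBy, decide_eq_true_eq, hlt, if_false, List.filter_cons]
      rw [ih hys]
      split_ifs <;> simp

theorem filter_foldl_insertBy_keyEq {α : Type} (key : α → Int) (k : Int) :
    ∀ (xs acc : List α), (∀ y ∈ acc, key y ≤ k) → (∀ x ∈ xs, key x ≤ k) →
    (List.foldl (fun acc x => PySem.List.insertBy (fun a b => decide (key a < key b)) x acc)
        acc xs).filter (fun y => decide (key y = k))
      = acc.filter (fun y => decide (key y = k)) ++ xs.filter (fun y => decide (key y = k)) := by
  intro xs
  induction xs with
  | nil => intro acc _ _; simp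
  | cons x rest ih =>
    intro acc hacc hxs
    have hx : key x ≤ k := hxs x (by simp)
    have hacc' : ∀ y ∈ PySem.List.insertBy (fun a b => decide (key a < key b)) x acc, key y ≤ k := by
      intro y hy
      have := (PySem.List.insertBy_perm (fun a b => decide (key a < key b)) x acc).mem_iff.mp hy
      rcases List.mem_cons.mp this with h | h
      · subst h; exact hx
      · exact hacc y h
    simp only [List.foldl_cons]
    rw [ih _ hacc' (fun z hz => hxs z (by simp [hz])),
        filter_insertBy_keyEq key k x acc hacc, List.filter_cons]
    by_cases h : key x = k <;> simp [h]

theorem filter_sorted_keyEq {α : Type} (key : α → Int) (k : Int) (xs : List α)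
    (h : ∀ x ∈ xs, key x ≤ k) :
    (PySem.List.sorted xs key).filter (fun y => decide (key y = k))
      = xs.filter (fun y => decide (key y = k)) := by
  rw [PySem.List.sorted_eq_foldl_insertBy,
      filter_foldl_insertBy_keyEq key k xs [] (by simp) h]
  simp

-- ---------- skipping the already-full bins in a pass ----------

theorem pvPass_filter (bins0 : List Int) :
    ∀ (xs : List (Int × Int)) (bins : List Int) (g : Int) (d : Bool),
    List.Pairwise (fun p q => p.1 ≠ q.1) xs →
    (∀ e ∈ xs, 0 ≤ e.1) →
    (∀ e ∈ xs, PySem.List.pyGetD bins e.1 0 = PySem.List.pyGetD bins0 e.1 0) →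
    pvPass xs bins g d =
      pvPass (xs.filter (fun e => decide (PySem.List.pyGetD bins0 e.1 0 < e.2))) bins g d := by
  intro xs
  induction xs with
  | nil => intro bins g d _ _ _; rfl
  | cons e rest ih =>
    intro bins g d hnd hnn hag
    obtain ⟨i, c⟩ := e
    have hagi : PySem.List.pyGetD bins i 0 = PySem.List.pyGetD bins0 i 0 := hag (i, c) (by simp)
    have hi0 : 0 ≤ i := hnn (i, c) (by simp)
    by_cases hfull : PySem.List.pyGetD bins0 i 0 < c
    · -- kept by the filter; both sides process it
      have hcond : PySem.List.pyGetD bins i 0 < c := by rw [hagi]; exact hfull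
      simp only [List.filter_cons, hfull, decide_true, pvPass, hcond, if_pos]
      by_cases hg : g - 1 = 0
      · simp [hg]
      · simp only [hg, if_false]
        apply ih
        · exact hnd.sublist (List.sublist_cons_self _ _)
        · exact fun e he => hnn e (by simp [he])
        · intro e he
          have hne : i ≠ e.1 := (List.pairwise_cons.mp hnd).1 e he
          have he0 : 0 ≤ e.1 := hnn e (by simp [he])
          have : PySem.List.pyGetD (bins.set i.toNat (PySem.List.pyGetD bins i 0 + 1)) e.1 0
              = PySem.List.pyGetD bins e.1 0 := by
            rw [PySem.List.pyGetD_of_nonneg _ _ he0, PySem.List.pyGetD_of_nonneg _ _ he0,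
                List.getD_eq_getElem?_getD, List.getD_eq_getElem?_getD,
                List.getElem?_set_ne (by omega)]
          rw [this]; exact hag e (by simp [he])
    · -- dropped by the filter; the pass skips it
      have hcond : ¬ PySem.List.pyGetD bins i 0 < c := by rw [hagi]; exact hfull
      simp only [List.filter_cons, hfull, decide_false, if_false, pvPass, hcond]
      apply ih
      · exact hnd.sublist (List.sublist_cons_self _ _)
      · exact fun e he => hnn e (by simp [he])
      · exact fun e he => hag e (by simp [he])

-- the value stored in `binsL caps k` at a valid index
theorem binsL_getD (caps : List Int) (k : Int) (j : Nat) (hj : j < caps.length) :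
    PySem.List.pyGetD (binsL caps k) (j : Int) 0
      = (if 0 < caps[j] then min caps[j] k else 0) := by
  rw [PySem.List.pyGetD_natCast, List.getD_eq_getElem?_getD, binsL,
      List.getElem?_map]
  simp [List.getElem?_eq_getElem hj]

-- ---------- the sorted pass from a level state = the index-order pass over non-full bins ----------

theorem pass_sorted (caps : List Int) (k g : Int) (d : Bool) (hk : 0 ≤ k) :
    pvPass (PySem.List.sorted (PySem.List.enumerate caps)
        (fun x => PySem.List.pyGetD (binsL caps k) x.1 0)) (binsL caps k) g d
      = pvPass ((PySem.List.enumerate caps).filter (fun e => decide (k < e.2)))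
          (binsL caps k) g d := by
  have hval : ∀ e ∈ PySem.List.enumerate caps 0,
      PySem.List.pyGetD (binsL caps k) e.1 0 = (if 0 < e.2 then min e.2 k else 0) ∧ 0 ≤ e.1 := by
    intro e he
    rw [PySem.List.mem_enumerate_iff] at he
    obtain ⟨j, hj, hej⟩ := he
    subst hej
    simp only [zero_add]
    exact ⟨binsL_getD caps k j hj, by positivity⟩
  have hperm : (PySem.List.sorted (PySem.List.enumerate caps)
      (fun x => PySem.List.pyGetD (binsL caps k) x.1 0)).Perm (PySem.List.enumerate caps 0) :=
    PySem.List.sorted_perm _ _ _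
  have hnd0 : ((PySem.List.enumerate caps 0).map Prod.fst).Nodup := by
    have h1 := PySem.List.pairwise_lt_enumerate caps 0
    have h2 : List.Pairwise (fun p q : Int × Int => p.1 ≠ q.1)
        (PySem.List.enumerate caps 0) := h1.imp (fun h => ne_of_lt h)
    exact List.pairwise_map.mpr h2
  have hnd : List.Pairwise (fun p q : Int × Int => p.1 ≠ q.1)
      (PySem.List.sorted (PySem.List.enumerate caps)
        (fun x => PySem.List.pyGetD (binsL caps k) x.1 0)) := by
    have h3 : ((PySem.List.sorted (PySem.List.enumerate caps)
        (fun x => PySem.List.pyGetD (binsL caps k) x.1 0)).map Prod.fst).Nodup :=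
      ((hperm.map Prod.fst).nodup_iff).mpr hnd0
    exact List.pairwise_map.mp h3
  rw [pvPass_filter (binsL caps k) _ _ g d hnd
      (fun e he => (hval e (hperm.mem_iff.mp he)).2) (fun _ _ => rfl)]
  congr 1
  -- filter chain
  have hcongr1 : ∀ e ∈ PySem.List.sorted (PySem.List.enumerate caps)
      (fun x => PySem.List.pyGetD (binsL caps k) x.1 0),
      (decide (PySem.List.pyGetD (binsL caps k) e.1 0 < e.2))
        = ((decide (PySem.List.pyGetD (binsL caps k) e.1 0 < e.2))
            && (decide (PySem.List.pyGetD (binsL caps k) e.1 0 = k))) := by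
    intro e he
    have hv := (hval e (hperm.mem_iff.mp he)).1
    by_cases hP : PySem.List.pyGetD (binsL caps k) e.1 0 < e.2
    · have hPk : PySem.List.pyGetD (binsL caps k) e.1 0 = k := by
        rw [hv] at hP ⊢
        split_ifs at hP ⊢ with h0
        · omega
        · omega
      simp [hPk]
    · simp [hP]
  have hcongr2 : ∀ e ∈ PySem.List.enumerate caps 0,
      ((decide (PySem.List.pyGetD (binsL caps k) e.1 0 < e.2))
          && (decide (PySem.List.pyGetD (binsL caps k) e.1 0 = k)))
        = decide (k < e.2) := by
    intro e he
    have hv := (hval e he).1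
    rw [hv]
    by_cases h0 : 0 < e.2
    · simp only [if_pos h0]
      by_cases h1 : k < e.2
      · have : min e.2 k = k := by omega
        rw [this]
        simp [h1]
      · simp [h1]
    · simp only [if_neg h0]
      have h1 : ¬ k < e.2 := by omega
      simp [h1]
      omega
  rw [List.filter_congr hcongr1, ← List.filter_filter,
      filter_sorted_keyEq (fun x => PySem.List.pyGetD (binsL caps k) x.1 0) k
        (PySem.List.enumerate caps 0)
        (fun e he => by
          show PySem.List.pyGetD (binsL caps k) e.1 0 ≤ k
          rw [(hval e he).1]; split_ifs <;> omega),
      List.filter_filter, List.filter_congr hcongr2]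

-- ---------- the index-order pass over non-full bins fills left to right ----------

theorem getD_append_cons (pre : List Int) (x : Int) (t : List Int) :
    PySem.List.pyGetD (pre ++ x :: t) ((pre.length : Nat) : Int) 0 = x := by
  rw [PySem.List.pyGetD_natCast, List.getD_eq_getElem?_getD,
      List.getElem?_append_right le_rfl]
  simp

theorem set_append_cons (pre : List Int) (x v : Int) (t : List Int) :
    (pre ++ x :: t).set pre.length v = pre ++ v :: t := by
  rw [List.set_append]
  simp

theorem pvPass_fill (k : Int) (hk : 0 ≤ k) :
    ∀ (rest pre : List Int) (g : Int) (d : Bool), 1 ≤ g →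
    pvPass ((PySem.List.enumerate rest (pre.length : Int)).filter
        (fun e => decide (k < e.2))) (pre ++ binsL rest k) g d
      = (pre ++ pvFill k rest (min g (mcN rest k : Int)),
         g - min g (mcN rest k : Int),
         d || decide (0 < min g (mcN rest k : Int))) := by
  intro rest
  induction rest with
  | nil =>
    intro pre g d hg
    have h0 : min g ((mcN ([] : List Int) k : Nat) : Int) = 0 := by
      simp [mcN]; omega
    rw [h0]
    simp [pvPass, binsL, pvFill]
  | cons c rest' ih =>
    intro pre g d hg
    have hM0 : (0 : Int) ≤ (mcN rest' k : Int) := by positivity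
    rw [PySem.List.enumerate_cons, List.filter_cons]
    by_cases hc : k < c
    · have hc0 : 0 < c := by omega
      have hvc : (if 0 < c then min c k else 0) = k := by rw [if_pos hc0]; omega
      have hdc : decide (k < (((pre.length : Int), c) : Int × Int).2) = true := by
        simp [hc]
      rw [if_pos hdc, binsL_cons, hvc]
      simp only [pvPass]
      rw [getD_append_cons]
      rw [if_pos hc]
      rw [Int.toNat_natCast, set_append_cons]
      have hMc : ((mcN (c :: rest') k : Nat) : Int) = (mcN rest' k : Int) + 1 := by
        rw [mcN_cons, if_pos hc]; push_cast; ring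
      have hfillc : pvFill k (c :: rest') (min g ((mcN (c :: rest') k : Nat) : Int))
          = (k + 1) :: pvFill k rest' (min (g - 1) ((mcN rest' k : Nat) : Int)) := by
        have hrem : 0 < min g ((mcN (c :: rest') k : Nat) : Int) := by
          rw [hMc]; omega
        simp only [pvFill]
        rw [if_pos ⟨hrem, hc⟩, hvc]
        have : min g ((mcN (c :: rest') k : Nat) : Int) - 1
            = min (g - 1) ((mcN rest' k : Nat) : Int) := by rw [hMc]; omega
        rw [this]
      by_cases hg1 : g - 1 = 0
      · rw [if_pos hg1]
        have hmin1 : min g ((mcN (c :: rest') k : Nat) : Int) = 1 := by rw [hMc]; omega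
        rw [hfillc, hmin1]
        have : min (g - 1) ((mcN rest' k : Nat) : Int) = 0 := by omega
        rw [this, pvFill_zero]
        have : (0 : Int) < 1 := by omega
        simp only [decide_eq_true this, Bool.or_true]
      · rw [if_neg hg1]
        have hlen : (pre.length : Int) + 1 = (((pre ++ [k + 1]).length : Nat) : Int) := by
          simp
        rw [hlen]
        have hbins : pre ++ (k + 1) :: binsL rest' k = (pre ++ [k + 1]) ++ binsL rest' k := by
          rw [List.append_cons]
        rw [hbins, ih (pre ++ [k + 1]) (g - 1) true (by omega)]
        rw [hfillc]
        have hminc : min g ((mcN (c :: rest') k : Nat) : Int)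
            = 1 + min (g - 1) ((mcN rest' k : Nat) : Int) := by rw [hMc]; omega
        have hpos : decide (0 < min g ((mcN (c :: rest') k : Nat) : Int)) = true := by
          rw [hMc]; simp; omega
        rw [hpos, Bool.or_true, Bool.true_or]
        refine Prod.ext (by simp) (Prod.ext ?_ rfl)
        show (g - 1) - min (g - 1) ((mcN rest' k : Nat) : Int)
            = g - min g ((mcN (c :: rest') k : Nat) : Int)
        rw [hminc]; ring
    · have hdc : decide (k < (((pre.length : Int), c) : Int × Int).2) = false := by
        simp [hc]
      rw [if_neg (by simp [hdc])]
      rw [binsL_cons]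
      have hlen : (pre.length : Int) + 1
          = (((pre ++ [if 0 < c then min c k else 0]).length : Nat) : Int) := by simp
      rw [hlen]
      have hbins : pre ++ (if 0 < c then min c k else 0) :: binsL rest' k
          = (pre ++ [if 0 < c then min c k else 0]) ++ binsL rest' k := by
        rw [List.append_cons]
      rw [hbins, ih (pre ++ [if 0 < c then min c k else 0]) g d hg]
      have hMc : ((mcN (c :: rest') k : Nat) : Int) = (mcN rest' k : Int) := by
        rw [mcN_cons, if_neg hc]; push_cast; ring
      have hfillc : pvFill k (c :: rest') (min g ((mcN (c :: rest') k : Nat) : Int))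
          = (if 0 < c then min c k else 0)
              :: pvFill k rest' (min g ((mcN rest' k : Nat) : Int)) := by
        simp only [pvFill]
        rw [if_neg (by tauto), hMc]
      rw [hfillc, hMc]
      refine Prod.ext ?_ rfl
      simp

theorem pass_step (caps : List Int) (k g : Int) (hk : 0 ≤ k) (hg : 1 ≤ g) :
    pvPass (PySem.List.sorted (PySem.List.enumerate caps)
        (fun x => PySem.List.pyGetD (binsL caps k) x.1 0)) (binsL caps k) g false
      = (pvFill k caps (min g (mcN caps k : Int)), g - min g (mcN caps k : Int),
         decide (0 < min g (mcN caps k : Int))) := by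
  rw [pass_sorted caps k g false hk]
  have := pvPass_fill k hk caps [] g false hg
  simpa using this

-- ---------- A's while-loop follows the reference recursion ----------

theorem mainEq : ∀ (caps : List Int) (k g : Int), 0 ≤ k → 1 ≤ g →
    pvWhile caps (binsL caps k) g = tgt caps k g := by
  intro caps k g
  induction k, g using tgt.induct (capacities := caps) with
  | case1 k g hmc =>
    intro hk hg
    have hm : min g ((mcN caps k : Nat) : Int) = 0 := by rw [hmc]; push_cast; omega
    rw [pvWhile, dif_pos (by omega : 0 < g)]
    simp only [pass_step caps k g hk hg, hm, pvFill_zero]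
    have hd : decide ((0 : Int) < 0) = false := by simp
    simp only [hd, sub_zero]
    rw [dif_neg (by simp : ¬ false = true)]
    rw [tgt, if_pos hmc]
  | case2 k g hmc hle =>
    intro hk hg
    have hm : min g ((mcN caps k : Nat) : Int) = g := by omega
    rw [pvWhile, dif_pos (by omega : 0 < g)]
    simp only [pass_step caps k g hk hg, hm]
    have hd : decide (0 < g) = true := by simp; omega
    simp only [hd]
    have hz : g - g = (0 : Int) := by ring
    simp only [hz]
    rw [pvWhile, dif_neg (by omega : ¬ (0:Int) < 0)]
    simp only [dite_eq_ite, ite_self]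
    rw [tgt, if_neg hmc, if_pos hle]
  | case3 k g hmc hgt ih =>
    intro hk hg
    have hm : min g ((mcN caps k : Nat) : Int) = ((mcN caps k : Nat) : Int) := by omega
    rw [pvWhile, dif_pos (by omega : 0 < g)]
    simp only [pass_step caps k g hk hg, hm]
    have hd : decide (0 < ((mcN caps k : Nat) : Int)) = true := by simp; omega
    simp only [hd]
    rw [pvFill_full k hk caps _ le_rfl]
    rw [ih (by omega) (by omega)]
    simp only [dite_eq_ite, if_true]
    conv_rhs => rw [tgt]
    rw [if_neg hmc, if_neg hgt]

-- ---------- arithmetic facts about the consumed-goods function ----------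


theorem sumMin_zero (caps : List Int) : pvSumMin caps 0 = 0 := by
  induction caps with
  | nil => simp [pvSumMin]
  | cons c rest ih => rw [sumMin_cons, ih]; split_ifs <;> omega

theorem sumMin_succ (caps : List Int) (k : Int) (hk : 0 ≤ k) :
    pvSumMin caps (k + 1) = pvSumMin caps k + (mcN caps k : Int) := by
  induction caps with
  | nil => simp [pvSumMin, mcN]
  | cons c rest ih =>
    rw [sumMin_cons, sumMin_cons, mcN_cons, ih]
    push_cast
    split_ifs <;> omega

theorem sumMin_mono (caps : List Int) (a b : Int) (h : a ≤ b) :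
    pvSumMin caps a ≤ pvSumMin caps b := by
  induction caps with
  | nil => simp [pvSumMin]
  | cons c rest ih =>
    rw [sumMin_cons, sumMin_cons]
    split_ifs <;> omega

theorem sumMin_le_total (caps : List Int) (k : Int) :
    pvSumMin caps k ≤ (caps.filter (fun c => decide (0 < c))).sum := by
  induction caps with
  | nil => simp [pvSumMin]
  | cons c rest ih =>
    rw [sumMin_cons, total_cons]
    split_ifs <;> omega

theorem total_nonneg (caps : List Int) : 0 ≤ (caps.filter (fun c => decide (0 < c))).sum := by
  induction caps with
  | nil => simp
  | cons c rest ih =>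
    rw [total_cons]
    split_ifs <;> omega

theorem min_total_le_sumMin (caps : List Int) (k : Int) (hk : 0 ≤ k) :
    min ((caps.filter (fun c => decide (0 < c))).sum) k ≤ pvSumMin caps k := by
  induction caps with
  | nil => simp [pvSumMin]
  | cons c rest ih =>
    have hT := total_nonneg rest
    rw [sumMin_cons, total_cons]
    split_ifs <;> omega

theorem mc_zero_sumMin (caps : List Int) (k : Int) (h : mcN caps k = 0) :
    pvSumMin caps k = (caps.filter (fun c => decide (0 < c))).sum := by
  induction caps with
  | nil => simp [pvSumMin]
  | cons c rest ih =>
    rw [mcN_cons] at h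
    have h1 : mcN rest k = 0 := by omega
    have h2 : ¬ k < c := by intro hc; simp [hc] at h
    rw [sumMin_cons, total_cons, ih h1]
    split_ifs <;> omega

theorem sumMin_total_mc_zero (caps : List Int) (k : Int) (hk : 0 ≤ k)
    (h : pvSumMin caps k = (caps.filter (fun c => decide (0 < c))).sum) :
    mcN caps k = 0 := by
  induction caps with
  | nil => simp [mcN]
  | cons c rest ih =>
    rw [sumMin_cons, total_cons] at h
    have h1 := sumMin_le_total rest k
    have h2 : (if 0 < c then min c k else 0) ≤ (if 0 < c then c else 0) := by
      split_ifs <;> omega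
    have h3 : pvSumMin rest k = (rest.filter (fun c => decide (0 < c))).sum := by omega
    have h4 : (if 0 < c then min c k else 0) = (if 0 < c then c else 0) := by omega
    rw [mcN_cons, ih h3]
    have h5 : ¬ k < c := by
      intro hc
      have hc0 : 0 < c := by omega
      rw [if_pos hc0, if_pos hc0] at h4
      omega
    simp [h5]

theorem mc_zero_binsL (caps : List Int) (k : Int) (h : mcN caps k = 0) :
    binsL caps k = satL caps := by
  induction caps with
  | nil => simp [binsL, satL]
  | cons c rest ih =>
    rw [mcN_cons] at h
    have h1 : mcN rest k = 0 := by omega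
    have h2 : ¬ k < c := by intro hc; simp [hc] at h
    rw [binsL_cons, ih h1]
    simp only [satL, List.map_cons]
    congr 1
    split_ifs <;> omega

theorem binsL_succ_eq (caps : List Int) (a : Int) (h : mcN caps a = 0) :
    binsL caps a = binsL caps (a + 1) := by
  induction caps with
  | nil => simp [binsL]
  | cons c rest ih =>
    rw [mcN_cons] at h
    have h1 : mcN rest a = 0 := by omega
    have h2 : ¬ a < c := by intro hc; simp [hc] at h
    rw [binsL_cons, binsL_cons, ih h1]
    congr 1
    split_ifs <;> omega

theorem binsL_const_aux (caps : List Int) : ∀ (n : Nat) (a b : Int), (b - a).toNat ≤ n →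
    0 ≤ a → a ≤ b → pvSumMin caps a = pvSumMin caps b → binsL caps a = binsL caps b := by
  intro n
  induction n with
  | zero =>
    intro a b hn _ hab _
    have : a = b := by omega
    rw [this]
  | succ n ih =>
    intro a b hn ha hab hf
    by_cases h : a = b
    · rw [h]
    · have h1 := sumMin_mono caps a (a + 1) (by omega)
      have h2 := sumMin_mono caps (a + 1) b (by omega)
      have h3 := sumMin_succ caps a ha
      have hmc : mcN caps a = 0 := by omega
      rw [binsL_succ_eq caps a hmc]
      exact ih (a + 1) b (by omega) (by omega) (by omega) (by omega)

theorem binsL_const (caps : List Int) : ∀ (a b : Int), 0 ≤ a → a ≤ b →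
    pvSumMin caps a = pvSumMin caps b → binsL caps a = binsL caps b := fun a b =>
  binsL_const_aux caps (b - a).toNat a b le_rfl

theorem binsL_zero (caps : List Int) : binsL caps 0 = List.replicate caps.length 0 := by
  induction caps with
  | nil => simp [binsL]
  | cons c rest ih =>
    rw [binsL_cons, ih]
    have : (if 0 < c then min c 0 else 0) = 0 := by split_ifs <;> omega
    rw [this]
    rfl

-- ---------- the reference recursion in the saturated case ----------

theorem tgt_sat : ∀ (caps : List Int) (k g : Int), 0 ≤ k → 1 ≤ g →
    (caps.filter (fun c => decide (0 < c))).sum ≤ pvSumMin caps k + g →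
    tgt caps k g = satL caps := by
  intro caps k g
  induction k, g using tgt.induct (capacities := caps) with
  | case1 k g hmc =>
    intro _ _ _
    rw [tgt, if_pos hmc]
    exact mc_zero_binsL caps k hmc
  | case2 k g hmc hle =>
    intro hk hg htot
    have hsucc := sumMin_succ caps k hk
    have hlt := sumMin_le_total caps (k + 1)
    have hgm : g = (mcN caps k : Int) := by omega
    have hfull : pvSumMin caps (k + 1) = (caps.filter (fun c => decide (0 < c))).sum := by omega
    rw [tgt, if_neg hmc, if_pos hle]
    rw [pvFill_full k hk caps g (by omega),
        ← mc_zero_binsL caps (k + 1) (sumMin_total_mc_zero caps (k + 1) (by omega) hfull)]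
  | case3 k g hmc hgt ih =>
    intro hk hg htot
    have hsucc := sumMin_succ caps k hk
    rw [tgt, if_neg hmc, if_neg hgt]
    exact ih (by omega) (by omega) (by omega)

-- ---------- the binary search brackets the level ----------

theorem search_bracket_aux (caps : List Int) (g : Int) : ∀ (n : Nat) (lo hi : Int),
    (hi - lo).toNat ≤ n → 0 ≤ lo → lo ≤ hi →
    pvSumMin caps lo ≤ g → g < pvSumMin caps (hi + 1) →
    0 ≤ pvSearch caps g lo hi ∧ pvSumMin caps (pvSearch caps g lo hi) ≤ g ∧
      g < pvSumMin caps (pvSearch caps g lo hi + 1) := by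
  intro n
  induction n with
  | zero =>
    intro lo hi hn h0 hlohi hflo hfhi
    have heq : lo = hi := by omega
    rw [pvSearch, dif_neg (by omega)]
    subst heq
    exact ⟨h0, hflo, hfhi⟩
  | succ n ih =>
    intro lo hi hn h0 hlohi hflo hfhi
    by_cases h : lo < hi
    · have hb := PySem.Int.floordiv_two_mid_bounds (lo := lo + 1) (hi := hi) (by omega)
      have hm : lo + 1 + hi = lo + hi + 1 := by ring
      rw [hm] at hb
      rw [pvSearch, dif_pos h]
      by_cases hf : pvSumMin caps (PySem.Int.floordiv (lo + hi + 1) 2) ≤ g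
      · simp only [if_pos hf]
        exact ih (PySem.Int.floordiv (lo + hi + 1) 2) hi (by omega) (by omega) (by omega) hf hfhi
      · simp only [if_neg hf]
        refine ih lo (PySem.Int.floordiv (lo + hi + 1) 2 - 1) (by omega) h0 (by omega) hflo ?_
        have hm2 : PySem.Int.floordiv (lo + hi + 1) 2 - 1 + 1
            = PySem.Int.floordiv (lo + hi + 1) 2 := by ring
        rw [hm2]
        omega
    · have heq : lo = hi := by omega
      rw [pvSearch, dif_neg h]
      subst heq
      exact ⟨h0, hflo, hfhi⟩

theorem search_bracket (caps : List Int) (g : Int) : ∀ (lo hi : Int), 0 ≤ lo → lo ≤ hi →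
    pvSumMin caps lo ≤ g → g < pvSumMin caps (hi + 1) →
    0 ≤ pvSearch caps g lo hi ∧ pvSumMin caps (pvSearch caps g lo hi) ≤ g ∧
      g < pvSumMin caps (pvSearch caps g lo hi + 1) := fun lo hi =>
  search_bracket_aux caps g (hi - lo).toNat lo hi le_rfl

-- ---------- the reference recursion in the unsaturated case ----------

theorem tgt_fill (caps : List Int) (g L : Int) (hL : 0 ≤ L)
    (hbr1 : pvSumMin caps L ≤ g) (hbr2 : g < pvSumMin caps (L + 1)) :
    ∀ (k : Int), 0 ≤ k → k ≤ L → 1 ≤ g - pvSumMin caps k →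
    tgt caps k (g - pvSumMin caps k) = pvFill L caps (g - pvSumMin caps L) := by
  suffices haux : ∀ (n : Nat) (k : Int), (L - k).toNat ≤ n → 0 ≤ k → k ≤ L →
      1 ≤ g - pvSumMin caps k →
      tgt caps k (g - pvSumMin caps k) = pvFill L caps (g - pvSumMin caps L) by
    intro k hk hkL hg
    exact haux (L - k).toNat k le_rfl hk hkL hg
  intro n
  induction n with
  | zero =>
    intro k hn hk hkL hg
    have heq : k = L := by omega
    subst heq
    have hsucc := sumMin_succ caps k hk
    have hmc : ¬ mcN caps k = 0 := by
      intro h0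
      rw [h0] at hsucc
      omega
    rw [tgt, if_neg hmc, if_pos (by omega : g - pvSumMin caps k ≤ (mcN caps k : Int))]
  | succ n ih =>
    intro k hn hk hkL hg
    have hsucc := sumMin_succ caps k hk
    have hfkle : pvSumMin caps k ≤ g := by omega
    have hmc : ¬ mcN caps k = 0 := by
      intro h0
      have htot := mc_zero_sumMin caps k h0
      have hle := sumMin_le_total caps (L + 1)
      omega
    by_cases hle : g - pvSumMin caps k ≤ (mcN caps k : Int)
    · rw [tgt]
      rw [if_neg hmc]
      rw [if_pos hle]
      by_cases hkL' : k = L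
      · subst hkL'; rfl
      · have hkL2 : k + 1 ≤ L := by omega
        have hmono := sumMin_mono caps (k + 1) L hkL2
        have hgL : g = pvSumMin caps (k + 1) := by omega
        have hfL : pvSumMin caps L = g := by omega
        rw [pvFill_full k hk caps _ (by omega), hfL]
        rw [show g - g = (0 : Int) by ring, pvFill_zero]
        exact binsL_const caps (k + 1) L (by omega) hkL2 (by omega)
    · have hkL' : ¬ k = L := by
        intro h0
        subst h0
        omega
      rw [tgt]
      rw [if_neg hmc]
      rw [if_neg hle]
      have harg : g - pvSumMin caps k - (mcN caps k : Int) = g - pvSumMin caps (k + 1) := by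
        omega
      rw [harg]
      exact ih (k + 1) (by omega) (by omega) (by omega) (by omega)

-- ===== VERDICT (by name: the statement is the Claim_ definition above) =====
theorem distribute_goods_spec : Claim_equal_distribute_goods := by
  intro goods caps _
  unfold Spec_distribute_goods distribute_goods distribute_goods_alt
  by_cases hg : goods ≤ 0
  · rw [pvWhile, dif_neg (by omega)]
    simp [hg]
  · have hg1 : 1 ≤ goods := by omega
    rw [if_neg hg, ← binsL_zero caps]
    rw [mainEq caps 0 goods le_rfl hg1]
    by_cases ht : (caps.filter (fun c => decide (0 < c))).sum ≤ goods
    · rw [if_pos ht]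
      exact tgt_sat caps 0 goods le_rfl hg1 (by rw [sumMin_zero]; omega)
    · rw [if_neg ht]
      have hbr := search_bracket caps goods 0 goods le_rfl (by omega)
        (by rw [sumMin_zero]; omega)
        (by
          have h1 := min_total_le_sumMin caps (goods + 1) (by omega)
          omega)
      obtain ⟨hL0, hb1, hb2⟩ := hbr
      have := tgt_fill caps goods (pvSearch caps goods 0 goods) hL0 hb1 hb2 0 le_rfl hL0
        (by rw [sumMin_zero]; omega)
      rw [sumMin_zero] at this
      simpa using this
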